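-- pv_equiv track=rewrite | github.com/amd/gaia | src/gaia/observability/tracing/propagator.py | is_valid_traceparent
-- ===== SOURCE A (Python) =====
-- def is_valid_traceparent(traceparent: str) -> bool:
--     """
--     Validate W3C traceparent format.
--
--     Args:
--         traceparent: Traceparent header value
--
--     Returns:
--         True if valid format
--
--     Example:
--         >>> W3CPropagator.is_valid_traceparent(
--         ...     "00-4bf92f3577b34da6a3ce929d0e0e4736-00f067aa0ba902b7-01"
--         ... )
--         True
--     """
--     parts = traceparent.split("-")
--     if len(parts) != 4:
--         return False
--
--     version, trace_id, span_id, trace_flags = parts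
--     if version not in ("00", "ff"):
--         return False
--     if len(trace_id) != 32 or not all(c in "0123456789abcdef" for c in trace_id.lower()):
--         return False
--     if len(span_id) != 16 or not all(c in "0123456789abcdef" for c in span_id.lower()):
--         return False
--     if len(trace_flags) != 2 or not all(c in "0123456789abcdef" for c in trace_flags.lower()):
--         return False
--
--     return True
-- ===== SOURCE B (Python) =====
-- import re
--
-- _TRACEPARENT_RE = re.compile(r"(00|ff)-[0-9a-fA-F]{32}-[0-9a-fA-F]{16}-[0-9a-fA-F]{2}")
--
--
-- def is_valid_traceparent(traceparent: str) -> bool: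
--     """Validate W3C traceparent format with a single anchored regex match."""
--     return _TRACEPARENT_RE.fullmatch(traceparent) is not None
-- ===== Notes on version B (the rewrite author's own statement) =====
-- stated objective: idiomatic
-- what changed: Replaced the split-into-four-fields-then-check-each-field validation by a single anchored regex fullmatch of the whole header against (00|ff)-[0-9a-fA-F]{32}-[0-9a-fA-F]{16}-[0-9a-fA-F]{2}.
import Mathlib
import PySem

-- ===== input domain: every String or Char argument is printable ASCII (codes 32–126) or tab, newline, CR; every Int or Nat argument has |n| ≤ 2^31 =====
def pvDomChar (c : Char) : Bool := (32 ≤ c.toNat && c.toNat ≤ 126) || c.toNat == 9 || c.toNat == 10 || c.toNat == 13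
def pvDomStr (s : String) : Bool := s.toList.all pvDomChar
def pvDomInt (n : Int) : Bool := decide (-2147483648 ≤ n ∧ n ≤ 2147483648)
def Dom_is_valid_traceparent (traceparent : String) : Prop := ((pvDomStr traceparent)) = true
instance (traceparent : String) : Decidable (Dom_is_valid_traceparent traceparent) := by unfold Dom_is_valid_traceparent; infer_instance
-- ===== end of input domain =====

-- B replaces A's split-into-4-parts-and-check-each-field validation by a single anchored
-- regex fullmatch of the whole header (objective: idiomatic).

-- ===== PORT A =====
-- the string literal "0123456789abcdef" A tests membership in
def pvHexStr : List Char := "0123456789abcdef".toList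

-- `c in "0123456789abcdef"` for a single character c is exactly list membership of that
-- character in the string's characters (exact: sub-of-length-1 infix = element membership).
def is_valid_traceparent (traceparent : String) : Bool :=
  if (PySem.Chars.splitOn traceparent.toList ['-']).length ≠ 4 then false
  else
    match PySem.Chars.splitOn traceparent.toList ['-'] with
    | [version, trace_id, span_id, trace_flags] =>
      if ¬ (version = ['0', '0'] ∨ version = ['f', 'f']) then false
      else if trace_id.length ≠ 32 ∨ ¬ ((PySem.Chars.lower trace_id).all (fun c => pvHexStr.contains c)) then false
      else if span_id.length ≠ 16 ∨ ¬ ((PySem.Chars.lower span_id).all (fun c => pvHexStr.contains c)) then false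
      else if trace_flags.length ≠ 2 ∨ ¬ ((PySem.Chars.lower trace_flags).all (fun c => pvHexStr.contains c)) then false
      else true
    | _ => false

-- ===== PORT B =====
-- Hand port of B's compiled regex, matched left to right exactly as re.fullmatch does:
-- the character class [0-9a-fA-F]
def pvHexCharB (c : Char) : Bool :=
  (decide ('0' ≤ c) && decide (c ≤ '9')) || (decide ('a' ≤ c) && decide (c ≤ 'f')) ||
    (decide ('A' ≤ c) && decide (c ≤ 'F'))

-- consume exactly n characters of the class [0-9a-fA-F], returning the rest (none = no match)
def pvTakeHex : Nat → List Char → Option (List Char)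
  | 0, rest => some rest
  | n + 1, c :: rest => if pvHexCharB c then pvTakeHex n rest else none
  | _ + 1, [] => none

-- the part of the pattern after "(00|ff)-": [0-9a-fA-F]{32}-[0-9a-fA-F]{16}-[0-9a-fA-F]{2}, anchored at the end
def pvMatchTail (rest : List Char) : Bool :=
  match pvTakeHex 32 rest with
  | none => false
  | some l1 =>
    match l1 with
    | [] => false
    | c1 :: r1 =>
      if c1 = '-' then
        match pvTakeHex 16 r1 with
        | none => false
        | some l2 =>
          match l2 with
          | [] => false
          | c2 :: r2 =>
            if c2 = '-' then
              match pvTakeHex 2 r2 with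
              | none => false
              | some l3 =>
                match l3 with
                | [] => true
                | _ :: _ => false
            else false
      else false

-- the leading alternation "(00|ff)-": two literal characters, then the separator
def is_valid_traceparent_alt (traceparent : String) : Bool :=
  match traceparent.toList with
  | [] => false
  | c1 :: r1 =>
    match r1 with
    | [] => false
    | c2 :: r2 =>
      match r2 with
      | [] => false
      | c3 :: rest =>
        if ((c1 = '0' ∧ c2 = '0') ∨ (c1 = 'f' ∧ c2 = 'f')) ∧ c3 = '-' then pvMatchTail rest
        else false

-- ===== PRECONDITION & SPEC =====
def Spec_is_valid_traceparent (traceparent : String) (out : Bool) : Prop := out = is_valid_traceparent_alt traceparent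
instance (traceparent : String) (out : Bool) : Decidable (Spec_is_valid_traceparent traceparent out) := by unfold Spec_is_valid_traceparent; infer_instance

-- ===== CLAIM (what is proved, stated in full; the proofs are below) =====
def Claim_equal_is_valid_traceparent : Prop := ∀ (traceparent : String), Dom_is_valid_traceparent traceparent → Spec_is_valid_traceparent traceparent (is_valid_traceparent traceparent)

-- ===== LEMMAS AND PROOFS =====

-- reference splitter used only by the proofs: split on '-' defined by structural recursion
def pvSplit1 : List Char → List (List Char)
  | [] => [[]]
  | c :: rest =>
    if c = '-' then [] :: pvSplit1 rest
    else
      match pvSplit1 rest with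
      | p :: ps => (c :: p) :: ps
      | [] => [[c]]

lemma pvSplit1_ne_nil (l : List Char) : pvSplit1 l ≠ [] := by
  cases l with
  | nil => simp [pvSplit1]
  | cons c rest =>
    simp only [pvSplit1]
    split
    · simp
    · split <;> simp

def pvConsHead (pre : List Char) : List (List Char) → List (List Char)
  | p :: ps => (pre ++ p) :: ps
  | [] => [pre]

lemma pvGo_spec (l : List Char) : ∀ (fuel : Nat) (cur : List Char) (acc : List (List Char)),
    l.length < fuel →
    PySem.Chars.splitOn.go ['-'] fuel l cur acc = acc.reverse ++ pvConsHead cur.reverse (pvSplit1 l) := by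
  induction l with
  | nil =>
    intro fuel cur acc hf
    cases fuel with
    | zero => omega
    | succ f => simp [PySem.Chars.splitOn.go, pvSplit1, pvConsHead]
  | cons c rest ih =>
    intro fuel cur acc hf
    cases fuel with
    | zero => simp at hf
    | succ f =>
      by_cases hc : c = '-'
      · subst hc
        have hpre : List.isPrefixOf ['-'] ('-' :: rest) = true := by simp [List.isPrefixOf]
        rw [PySem.Chars.splitOn.go, if_pos hpre]
        simp only [List.length_cons, List.length_nil, List.drop_succ_cons, List.drop_zero,
          Nat.zero_add] at *
        rw [ih f [] ((cur.reverse) :: acc) (by omega)]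
        simp only [pvSplit1, List.reverse_cons, List.reverse_nil]
        cases hps : pvSplit1 rest with
        | nil => exact absurd hps (pvSplit1_ne_nil rest)
        | cons p ps => simp [pvConsHead]
      · have hpre : List.isPrefixOf ['-'] (c :: rest) = false := by
          simp [List.isPrefixOf]
          exact fun h => absurd h.symm hc
        rw [PySem.Chars.splitOn.go, if_neg (by simp [hpre])]
        simp only [List.length_cons] at hf
        rw [ih f (c :: cur) acc (by omega)]
        simp only [pvSplit1, if_neg hc]
        cases hps : pvSplit1 rest with
        | nil => exact absurd hps (pvSplit1_ne_nil rest)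
        | cons p ps => simp [pvConsHead]

lemma pvSplitOn_eq (l : List Char) : PySem.Chars.splitOn l ['-'] = pvSplit1 l := by
  unfold PySem.Chars.splitOn
  rw [pvGo_spec l (l.length + 1) [] [] (by omega)]
  cases hps : pvSplit1 l with
  | nil => exact absurd hps (pvSplit1_ne_nil l)
  | cons p ps => simp [pvConsHead]

lemma pvSplit1_append_dash (a r : List Char) (ha : '-' ∉ a) :
    pvSplit1 (a ++ '-' :: r) = a :: pvSplit1 r := by
  induction a with
  | nil => simp [pvSplit1]
  | cons c a' ih =>
    have hc : c ≠ '-' := fun h => ha (h ▸ List.mem_cons_self)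
    have ha' : '-' ∉ a' := fun h => ha (List.mem_cons_of_mem _ h)
    simp only [List.cons_append, pvSplit1, if_neg hc, ih ha']

lemma pvSplit1_no_dash (a : List Char) (ha : '-' ∉ a) : pvSplit1 a = [a] := by
  induction a with
  | nil => rfl
  | cons c a' ih =>
    have hc : c ≠ '-' := fun h => ha (h ▸ List.mem_cons_self)
    have ha' : '-' ∉ a' := fun h => ha (List.mem_cons_of_mem _ h)
    simp only [pvSplit1, if_neg hc, ih ha']

-- the four parts of a 4-way split reassemble to the original string
def pvJoin : List (List Char) → List Char
  | [] => []
  | [p] => p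
  | p :: ps => p ++ '-' :: pvJoin ps

lemma pvJoin_split1 (l : List Char) : pvJoin (pvSplit1 l) = l := by
  induction l with
  | nil => rfl
  | cons c rest ih =>
    by_cases hc : c = '-'
    · subst hc
      simp only [pvSplit1]
      cases hps : pvSplit1 rest with
      | nil => exact absurd hps (pvSplit1_ne_nil rest)
      | cons p ps =>
        rw [hps] at ih
        simp [pvJoin, ih]
    · simp only [pvSplit1, if_neg hc]
      cases hps : pvSplit1 rest with
      | nil => exact absurd hps (pvSplit1_ne_nil rest)
      | cons p ps =>
        rw [hps] at ih
        cases ps with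
        | nil => simpa [pvJoin] using congrArg (c :: ·) ih
        | cons q qs => simpa [pvJoin, List.append_assoc] using congrArg (c :: ·) ih

lemma char_eq_of_toNat (c : Char) {n : Nat} (h : c.toNat = n) : c = Char.ofNat n := by
  have := Char.ofNat_toNat c; rw [h] at this; rw [← this]

lemma pvHexStr_contains_iff (c : Char) :
    pvHexStr.contains c = true ↔ (48 ≤ c.toNat ∧ c.toNat ≤ 57) ∨ (97 ≤ c.toNat ∧ c.toNat ≤ 102) := by
  have hl : pvHexStr = ['0','1','2','3','4','5','6','7','8','9','a','b','c','d','e','f'] := by decide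
  rw [hl, List.contains_eq_mem, decide_eq_true_eq]
  constructor
  · intro h
    simp only [List.mem_cons, List.not_mem_nil, or_false] at h
    rcases h with h|h|h|h|h|h|h|h|h|h|h|h|h|h|h|h <;> subst h <;> decide
  · have hd : ∀ n : Nat, n < 128 → ((48 ≤ n ∧ n ≤ 57) ∨ (97 ≤ n ∧ n ≤ 102)) →
        Char.ofNat n ∈ ['0','1','2','3','4','5','6','7','8','9','a','b','c','d','e','f'] := by decide
    intro h
    rw [char_eq_of_toNat c rfl]
    exact hd _ (by omega) h

lemma pvHexCharB_iff (c : Char) :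
    pvHexCharB c = true ↔
      (48 ≤ c.toNat ∧ c.toNat ≤ 57) ∨ (97 ≤ c.toNat ∧ c.toNat ≤ 102) ∨ (65 ≤ c.toNat ∧ c.toNat ≤ 70) := by
  simp only [pvHexCharB, Bool.or_eq_true, Bool.and_eq_true, decide_eq_true_eq]
  rw [or_assoc]
  exact Iff.rfl

-- the pointwise equivalence: lowercased-char-in-"0123456789abcdef" ⟺ the regex class [0-9a-fA-F]
lemma pvHex_lower_eq (c : Char) : pvHexStr.contains (PySem.Chars.lowerChar c) = pvHexCharB c := by
  rw [Bool.eq_iff_iff, pvHexCharB_iff]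
  unfold PySem.Chars.lowerChar PySem.Chars.isupper
  by_cases h : ('A' ≤ c ∧ c ≤ 'Z')
  · have h1 : 65 ≤ c.toNat := h.1
    have h2 : c.toNat ≤ 90 := h.2
    rw [if_pos (by simp [h.1, h.2])]
    have hv : (Char.ofNat (c.toNat + 32)).toNat = c.toNat + 32 := by
      rw [Char.toNat_ofNat, if_pos (Or.inl (by omega))]
    rw [pvHexStr_contains_iff, hv]
    omega
  · have h' : ¬ (65 ≤ c.toNat ∧ c.toNat ≤ 90) := h
    rw [if_neg (by simpa using fun hA hZ => h ⟨hA, hZ⟩)]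
    rw [pvHexStr_contains_iff]
    omega

lemma pvAll_lower_eq (l : List Char) :
    (PySem.Chars.lower l).all (fun c => pvHexStr.contains c) = l.all pvHexCharB := by
  unfold PySem.Chars.lower
  rw [List.all_map]
  congr 1
  funext c
  exact pvHex_lower_eq c

lemma pvNo_dash_of_hex (l : List Char) (h : l.all pvHexCharB = true) : '-' ∉ l := by
  intro hm
  have := (List.all_eq_true.mp h) '-' hm
  simp [pvHexCharB] at this

lemma pvTakeHex_append (t r : List Char) (h2 : t.all pvHexCharB = true) :
    pvTakeHex t.length (t ++ r) = some r := by
  induction t with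
  | nil => rfl
  | cons c t' ih =>
    simp only [List.all_cons, Bool.and_eq_true] at h2
    simp only [List.length_cons, List.cons_append, pvTakeHex, if_pos h2.1]
    exact ih h2.2

lemma pvTakeHex_inv (n : Nat) : ∀ (cs r : List Char), pvTakeHex n cs = some r →
    ∃ t, cs = t ++ r ∧ t.length = n ∧ t.all pvHexCharB = true := by
  induction n with
  | zero =>
    intro cs r h
    simp only [pvTakeHex, Option.some.injEq] at h
    exact ⟨[], by simp [h]⟩
  | succ n ih =>
    intro cs r h
    cases cs with
    | nil => simp [pvTakeHex] at h
    | cons c rest =>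
      simp only [pvTakeHex] at h
      by_cases hc : pvHexCharB c = true
      · rw [if_pos hc] at h
        obtain ⟨t, ht1, ht2, ht3⟩ := ih rest r h
        exact ⟨c :: t, by simp [ht1], by simp [ht2], by simp [hc, ht3]⟩
      · rw [if_neg hc] at h
        exact absurd h (by simp)

lemma pvAll_mem_hex (t : List Char) (h : ∀ x ∈ PySem.Chars.lower t, x ∈ pvHexStr) :
    t.all pvHexCharB = true := by
  rw [← pvAll_lower_eq, List.all_eq_true]
  intro x hx
  rw [List.contains_eq_mem, decide_eq_true_eq]
  exact h x hx

-- A = true → B = true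
lemma pvA_imp_B (s : String) (h : is_valid_traceparent s = true) :
    is_valid_traceparent_alt s = true := by
  unfold is_valid_traceparent at h
  rw [pvSplitOn_eq] at h
  split_ifs at h with h4
  rcases hps : pvSplit1 s.toList with _ | ⟨v, _ | ⟨t, _ | ⟨sp, _ | ⟨f, _ | _⟩⟩⟩⟩ <;>
    rw [hps] at h <;> simp_all
  obtain ⟨hv, ⟨ht1, ht2⟩, ⟨hs1, hs2⟩, hf1, hf2⟩ := h
  have hshape := pvJoin_split1 s.toList
  rw [hps] at hshape
  simp only [pvJoin] at hshape
  have htall : t.all pvHexCharB = true := pvAll_mem_hex t ht2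
  have hsall : sp.all pvHexCharB = true := pvAll_mem_hex sp hs2
  have hfall : f.all pvHexCharB = true := pvAll_mem_hex f hf2
  have e1 : pvTakeHex 32 (t ++ '-' :: (sp ++ '-' :: f)) = some ('-' :: (sp ++ '-' :: f)) := by
    rw [← ht1]; exact pvTakeHex_append t _ htall
  have e2 : pvTakeHex 16 (sp ++ '-' :: f) = some ('-' :: f) := by
    rw [← hs1]; exact pvTakeHex_append sp _ hsall
  have e3 : pvTakeHex 2 f = some [] := by
    rw [← hf1]
    have hlast := pvTakeHex_append f [] hfall
    rwa [List.append_nil] at hlast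
  have htail : pvMatchTail (t ++ '-' :: (sp ++ '-' :: f)) = true := by
    simp [pvMatchTail, e1, e2, e3]
  unfold is_valid_traceparent_alt
  rcases hv with hv | hv <;> subst hv <;> rw [← hshape] <;> simp [htail]

lemma pvCond_false (t : List Char) (n : Nat) (h1 : t.length = n) (h2 : t.all pvHexCharB = true) :
    ¬ (t.length ≠ n ∨ ¬ ((PySem.Chars.lower t).all (fun c => pvHexStr.contains c) = true)) := by
  rw [pvAll_lower_eq]
  simp [h1, h2]

-- B = true → A = true
lemma pvB_imp_A (s : String) (h : is_valid_traceparent_alt s = true) :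
    is_valid_traceparent s = true := by
  unfold is_valid_traceparent_alt at h
  rcases hl : s.toList with _ | ⟨c1, _ | ⟨c2, _ | ⟨c3, rest⟩⟩⟩ <;> rw [hl] at h
  · exact absurd h (by simp)
  · exact absurd h (by simp)
  · exact absurd h (by simp)
  replace h : (if ((c1 = '0' ∧ c2 = '0') ∨ (c1 = 'f' ∧ c2 = 'f')) ∧ c3 = '-' then pvMatchTail rest
      else false) = true := h
  split_ifs at h with hc
  obtain ⟨hc12, hc3⟩ := hc
  subst hc3
  -- peel pvMatchTail: three hex runs separated by '-', ending the string
  unfold pvMatchTail at h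
  split at h
  case h_1 => exact absurd h (by simp)
  case h_2 l1 heq1 =>
  split at h
  case h_1 => exact absurd h (by simp)
  case h_2 d1 r1 =>
  split_ifs at h with hd1
  subst hd1
  split at h
  case h_1 => exact absurd h (by simp)
  case h_2 l2 heq2 =>
  split at h
  case h_1 => exact absurd h (by simp)
  case h_2 d2 r2 =>
  split_ifs at h with hd2
  subst hd2
  split at h
  case h_1 => exact absurd h (by simp)
  case h_2 l3 heq3 =>
  split at h
  case h_2 => exact absurd h (by simp)
  case h_1 =>
  clear h
  obtain ⟨t, htr, htl, hta⟩ := pvTakeHex_inv 32 rest _ heq1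
  obtain ⟨sp, hsr, hsl, hsa⟩ := pvTakeHex_inv 16 r1 _ heq2
  obtain ⟨fl, hfr, hfl, hfa⟩ := pvTakeHex_inv 2 r2 _ heq3
  rw [List.append_nil] at hfr
  subst hfr hsr htr
  -- the version field: '00' or 'ff'
  have hvd : '-' ∉ [c1, c2] := by
    rcases hc12 with ⟨h1, h2⟩ | ⟨h1, h2⟩ <;> subst h1 h2 <;> decide
  have hshape : s.toList = [c1, c2] ++ '-' :: (t ++ '-' :: (sp ++ '-' :: r2)) := by
    rw [hl]; rfl
  have hsplit : pvSplit1 s.toList = [[c1, c2], t, sp, r2] := by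
    rw [hshape, pvSplit1_append_dash _ _ hvd,
      pvSplit1_append_dash t _ (pvNo_dash_of_hex t hta),
      pvSplit1_append_dash sp _ (pvNo_dash_of_hex sp hsa),
      pvSplit1_no_dash r2 (pvNo_dash_of_hex r2 hfa)]
  have hv' : [c1, c2] = ['0', '0'] ∨ [c1, c2] = ['f', 'f'] := by
    rcases hc12 with ⟨h1, h2⟩ | ⟨h1, h2⟩ <;> subst h1 h2 <;> [exact Or.inl rfl; exact Or.inr rfl]
  unfold is_valid_traceparent
  rw [pvSplitOn_eq, hsplit]
  simp only [List.length_cons, List.length_nil]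
  rw [if_neg (by omega)]
  rw [if_neg (not_not_intro hv')]
  rw [if_neg (pvCond_false t 32 htl hta)]
  rw [if_neg (pvCond_false sp 16 hsl hsa)]
  rw [if_neg (pvCond_false r2 2 hfl hfa)]

-- ===== VERDICT (by name: the statement is the Claim_ definition above) =====
theorem is_valid_traceparent_spec : Claim_equal_is_valid_traceparent := by
  intro s _
  unfold Spec_is_valid_traceparent
  cases hA : is_valid_traceparent s with
  | true => exact (pvA_imp_B s hA).symm
  | false =>
    cases hB : is_valid_traceparent_alt s with
    | true => rw [pvB_imp_A s hB] at hA; exact absurd hA (by simp)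
    | false => rfl
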